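-- pv_equiv track=rewrite | github.com/MouAoZ/TemporaryAxiomTool | scripts/cleanup_temporary_theorem_scaffolding.py | remove_delimited_blocks
-- ===== SOURCE A (Python) =====
-- def remove_delimited_blocks(text: str, start_marker: str, end_marker: str) -> tuple[str, int]:
--     lines = text.splitlines(keepends=True)
--     out: list[str] = []
--     idx = 0
--     removed = 0
--     while idx < len(lines):
--         if lines[idx].strip() == start_marker:
--             removed += 1
--             idx += 1
--             while idx < len(lines) and lines[idx].strip() != end_marker:
--                 idx += 1
--             if idx == len(lines):
--                 raise ValueError(f"Missing end marker {end_marker!r}")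
--             idx += 1
--             continue
--         out.append(lines[idx])
--         idx += 1
--     return ("".join(out), removed)
-- ===== SOURCE B (Python) =====
-- def remove_delimited_blocks(text: str, start_marker: str, end_marker: str) -> tuple[str, int]:
--     out: list[str] = []
--     removed = 0
--     inside = False
--     for line in text.splitlines(keepends=True):
--         if inside:
--             if line.strip() == end_marker:
--                 inside = False
--         elif line.strip() == start_marker:
--             removed += 1
--             inside = True
--         else:
--             out.append(line)
--     if inside:
--         raise ValueError(f"Missing end marker {end_marker!r}")
--     return ("".join(out), removed)
-- ===== Notes on version B (the rewrite author's own statement) =====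
-- stated objective: simpler
-- what changed: Replaces A's index-driven while loop with a nested inner scan that re-tests idx against len(lines) by one flat for-loop over the lines carrying a boolean `inside` state flag.
import Mathlib
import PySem

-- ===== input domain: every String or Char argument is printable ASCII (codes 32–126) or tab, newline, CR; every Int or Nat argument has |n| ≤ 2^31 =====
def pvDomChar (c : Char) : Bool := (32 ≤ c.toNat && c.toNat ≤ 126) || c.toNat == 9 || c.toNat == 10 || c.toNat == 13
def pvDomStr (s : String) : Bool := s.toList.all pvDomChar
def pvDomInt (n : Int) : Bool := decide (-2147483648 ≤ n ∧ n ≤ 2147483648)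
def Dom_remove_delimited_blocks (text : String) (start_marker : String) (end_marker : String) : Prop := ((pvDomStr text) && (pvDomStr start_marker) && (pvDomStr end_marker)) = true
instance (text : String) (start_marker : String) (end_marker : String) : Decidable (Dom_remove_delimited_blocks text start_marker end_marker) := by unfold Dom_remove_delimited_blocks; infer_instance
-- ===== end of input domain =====

-- B replaces A's index-driven while loop with a nested inner marker scan by one flat
-- pass over the lines keeping a boolean `inside` flag (objective: simpler; same O(n) cost).

-- shared helper: Python's str.splitlines(keepends=True); acc holds the current line reversed
-- (line breaks are \n, \r, \r\n — exact on the ASCII input domain Dom)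
def pvSplitKeep : List Char → List Char → List (List Char)
  | [], acc => if acc.isEmpty then [] else [acc.reverse]
  | '\x0d' :: '\n' :: rest, acc => (acc.reverse ++ ['\x0d', '\n']) :: pvSplitKeep rest []
  | c :: rest, acc =>
    if c = '\n' then (acc.reverse ++ ['\n']) :: pvSplitKeep rest []
    else if c = '\x0d' then (acc.reverse ++ ['\x0d']) :: pvSplitKeep rest []
    else pvSplitKeep rest (c :: acc)

-- ===== PORT A =====
-- inner `while` of A: skip lines until one strips to the end marker; none = Python raises
def pvAInner (e : List Char) : List (List Char) → Option (List (List Char))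
  | [] => none
  | l :: rest => if PySem.Chars.strip l = e then some rest else pvAInner e rest

theorem pvAInner_length (e : List Char) : ∀ (ls rest' : List (List Char)),
    pvAInner e ls = some rest' → rest'.length < ls.length := by
  intro ls
  induction ls with
  | nil => intro rest' h; simp [pvAInner] at h
  | cons l rest ih =>
    intro rest' h
    simp only [pvAInner] at h
    split at h
    · cases h; simp
    · have := ih rest' h; simp; omega

-- outer `while idx < len(lines)` of A (the ValueError path returns a sentinel; it is outside Pre_)
def pvALoop (s e : List Char) : List (List Char) → (List (List Char)) × Int
  | [] => ([], 0)
  | l :: rest =>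
    if PySem.Chars.strip l = s then
      match h : pvAInner e rest with
      | none => ([], -1)
      | some rest' =>
        let p := pvALoop s e rest'
        (p.1, p.2 + 1)
    else
      let p := pvALoop s e rest
      (l :: p.1, p.2)
termination_by ls => ls.length
decreasing_by
  · exact Nat.lt_succ_of_lt (pvAInner_length _ _ _ h)
  · simp

def remove_delimited_blocks (text : String) (start_marker : String) (end_marker : String) : String × Int :=
  let lines := pvSplitKeep text.toList []
  let p := pvALoop start_marker.toList end_marker.toList lines
  (String.ofList (PySem.Chars.join [] p.1), p.2)

-- ===== PORT B =====
-- one step of B's flat loop over the lines: state = (inside, out, removed)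
def pvBStep (s e : List Char) (st : Bool × List (List Char) × Int) (l : List Char) :
    Bool × List (List Char) × Int :=
  if st.1 then
    if PySem.Chars.strip l = e then (false, st.2.1, st.2.2) else st
  else if PySem.Chars.strip l = s then (true, st.2.1, st.2.2 + 1)
  else (false, st.2.1 ++ [l], st.2.2)

def remove_delimited_blocks_alt (text : String) (start_marker : String) (end_marker : String) : String × Int :=
  let st := (pvSplitKeep text.toList []).foldl
    (pvBStep start_marker.toList end_marker.toList) (false, [], 0)
  if st.1 then ("", -1)  -- Python B raises ValueError here; outside Pre_
  else (String.ofList (PySem.Chars.join [] st.2.1), st.2.2)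

-- ===== PRECONDITION & SPEC =====
-- marker-matching flag over the stripped lines of the text: False = every opened block is closed
def pvOpenFlag (s e : List Char) (b : Bool) : List (List Char) → Bool
  | [] => b
  | l :: rest =>
    if b then pvOpenFlag s e (!(PySem.Chars.strip l = e)) rest
    else pvOpenFlag s e (PySem.Chars.strip l = s) rest

-- A raises ValueError exactly when the text ends inside a block whose end-marker line never
-- comes; Pre_ states that matching condition on the text's lines (str.splitlines).
def Pre_remove_delimited_blocks (text : String) (start_marker : String) (end_marker : String) : Prop :=
  pvOpenFlag start_marker.toList end_marker.toList false (PySem.Chars.splitlines text.toList) = false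
instance (text : String) (start_marker : String) (end_marker : String) : Decidable (Pre_remove_delimited_blocks text start_marker end_marker) := by unfold Pre_remove_delimited_blocks; infer_instance

def pvWitness_remove_delimited_blocks : String × String × String :=
  ("a\nBEGIN\nx\nEND\nb\n", "BEGIN", "END")

def Spec_remove_delimited_blocks (text : String) (start_marker : String) (end_marker : String) (out : String × Int) : Prop := out = remove_delimited_blocks_alt text start_marker end_marker
instance (text : String) (start_marker : String) (end_marker : String) (out : String × Int) : Decidable (Spec_remove_delimited_blocks text start_marker end_marker out) := by unfold Spec_remove_delimited_blocks; infer_instance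

-- ===== CLAIM (what is proved, stated in full; the proofs are below) =====
def Claim_equal_remove_delimited_blocks : Prop := ∀ (text : String) (start_marker : String) (end_marker : String), Dom_remove_delimited_blocks text start_marker end_marker → Pre_remove_delimited_blocks text start_marker end_marker → Spec_remove_delimited_blocks text start_marker end_marker (remove_delimited_blocks text start_marker end_marker)

-- ===== LEMMAS AND PROOFS =====

-- stripping ignores a trailing run of whitespace
theorem pvStrip_append_ws (xs ws : List Char) (hws : ∀ c ∈ ws, PySem.Chars.isspace c = true) :
    PySem.Chars.strip (xs ++ ws) = PySem.Chars.strip xs := by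
  unfold PySem.Chars.strip PySem.Chars.lstrip PySem.Chars.rstrip
  rw [List.dropWhile_append]
  split
  · rename_i hempty
    have h1 : List.dropWhile PySem.Chars.isspace ws = [] :=
      List.dropWhile_eq_nil_iff.mpr (by intro c hc; exact hws c hc)
    have h2 : List.dropWhile PySem.Chars.isspace xs = [] := by
      simpa using hempty
    simp [h1, h2]
  · rw [List.reverse_append, List.dropWhile_append]
    have h1 : List.dropWhile PySem.Chars.isspace ws.reverse = [] :=
      List.dropWhile_eq_nil_iff.mpr (by intro c hc; exact hws c (List.mem_reverse.mp hc))
    simp [h1]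

-- the flag only looks at the stripped lines
theorem pvOpenFlag_congr (s e : List Char) : ∀ (ls ls' : List (List Char)) (b : Bool),
    ls.map PySem.Chars.strip = ls'.map PySem.Chars.strip →
    pvOpenFlag s e b ls = pvOpenFlag s e b ls' := by
  intro ls
  induction ls with
  | nil =>
    intro ls' b h
    have : ls' = [] := by simpa using (List.map_eq_nil_iff.mp h.symm)
    simp [this]
  | cons l rest ih =>
    intro ls' b h
    match ls' with
    | [] => simp at h
    | l' :: rest' =>
      simp only [List.map_cons, List.cons.injEq] at h
      obtain ⟨hl, hrest⟩ := h
      simp only [pvOpenFlag, hl]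
      split <;> exact ih rest' _ hrest

-- reduction lemmas for the two splitters
theorem pvGo_crlf (isB : Char → Bool) (rest cur : List Char) (acc : List (List Char)) :
    PySem.Chars.splitlines.go isB ('\x0d' :: '\n' :: rest) cur acc =
      PySem.Chars.splitlines.go isB rest [] (cur.reverse :: acc) := rfl

theorem pvGo_break (isB : Char → Bool) (c : Char) (rest cur : List Char) (acc : List (List Char))
    (hne : ∀ (r' : List Char), c = '\x0d' → rest = '\n' :: r' → False) (hB : isB c = true) :
    PySem.Chars.splitlines.go isB (c :: rest) cur acc =
      PySem.Chars.splitlines.go isB rest [] (cur.reverse :: acc) := by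
  rw [PySem.Chars.splitlines.go.eq_def]
  split
  · rename_i heq
    exact (List.cons_ne_nil _ _ heq).elim
  · rename_i r' heq
    injection heq with h1 h2
    exact (hne r' h1 h2).elim
  · rename_i c' rest' hne' heq
    injection heq with hc hr
    subst hc; subst hr
    rw [if_pos hB]

theorem pvGo_char (isB : Char → Bool) (c : Char) (rest cur : List Char) (acc : List (List Char))
    (hne : ∀ (r' : List Char), c = '\x0d' → rest = '\n' :: r' → False) (hB : isB c = false) :
    PySem.Chars.splitlines.go isB (c :: rest) cur acc =
      PySem.Chars.splitlines.go isB rest (c :: cur) acc := by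
  rw [PySem.Chars.splitlines.go.eq_def]
  split
  · rename_i heq
    exact (List.cons_ne_nil _ _ heq).elim
  · rename_i r' heq
    injection heq with h1 h2
    exact (hne r' h1 h2).elim
  · rename_i c' rest' hne' heq
    injection heq with hc hr
    subst hc; subst hr
    rw [hB]
    simp

theorem pvSK_crlf (rest : List Char) (acc : List Char) :
    pvSplitKeep ('\x0d' :: '\n' :: rest) acc = (acc.reverse ++ ['\x0d', '\n']) :: pvSplitKeep rest [] := rfl

theorem pvSK_nl (rest : List Char) (acc : List Char) :
    pvSplitKeep ('\n' :: rest) acc = (acc.reverse ++ ['\n']) :: pvSplitKeep rest [] := rfl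

theorem pvSK_cr (rest : List Char) (acc : List Char)
    (hne : ∀ (r' : List Char), rest = '\n' :: r' → False) :
    pvSplitKeep ('\x0d' :: rest) acc = (acc.reverse ++ ['\x0d']) :: pvSplitKeep rest [] := by
  rw [pvSplitKeep.eq_def]
  split
  · rename_i heq
    exact (List.cons_ne_nil _ _ heq).elim
  · rename_i r' heq
    injection heq with _ h2
    exact (hne r' h2).elim
  · rename_i c' rest' heq
    injection heq with h1 h2
    subst h1; subst h2
    rw [if_neg (by decide), if_pos rfl]

theorem pvSK_other (c : Char) (rest : List Char) (acc : List Char)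
    (h1 : ¬ c = '\n') (h2 : ¬ c = '\x0d') :
    pvSplitKeep (c :: rest) acc = pvSplitKeep rest (c :: acc) := by
  rw [pvSplitKeep.eq_def]
  split
  · rename_i heq
    exact (List.cons_ne_nil _ _ heq).elim
  · rename_i r' heq
    injection heq with ha _
    exact absurd ha h2
  · rename_i c' rest' heq
    injection heq with ha hb
    subst ha; subst hb
    rw [if_neg h1, if_neg h2]

-- accumulator lemma for the builtin splitlines loop
theorem pvGo_acc (isB : Char → Bool) : ∀ (cs cur : List Char) (acc : List (List Char)),
    PySem.Chars.splitlines.go isB cs cur acc = acc.reverse ++ PySem.Chars.splitlines.go isB cs cur [] := by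
  have key : ∀ (cs cur : List Char) (acc0 : List (List Char)), ∀ (acc : List (List Char)),
      PySem.Chars.splitlines.go isB cs cur acc = acc.reverse ++ PySem.Chars.splitlines.go isB cs cur [] := by
    intro cs cur acc0
    induction cs, cur, acc0 using PySem.Chars.splitlines.go.induct (isB := isB) with
    | case1 cur acc hcur => intro acc'; simp [PySem.Chars.splitlines.go, hcur]
    | case2 cur acc hcur =>
      intro acc'
      simp [PySem.Chars.splitlines.go, (by revert hcur; cases cur.isEmpty <;> simp : cur.isEmpty = false)]
    | case3 rest cur acc ih =>
      intro acc'
      rw [pvGo_crlf, pvGo_crlf, ih, ih [cur.reverse]]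
      simp
    | case4 c rest cur acc hne hB ih =>
      intro acc'
      rw [pvGo_break isB c rest cur acc' hne hB, pvGo_break isB c rest cur [] hne hB,
        ih, ih [cur.reverse]]
      simp
    | case5 c rest cur acc hne hB ih =>
      intro acc'
      rw [pvGo_char isB c rest cur acc' hne (by simpa using hB),
        pvGo_char isB c rest cur [] hne (by simpa using hB), ih]
  intro cs cur acc
  exact key cs cur [] acc

-- over the input domain, the builtin's line-break test is exactly {'\n', '\r'}
theorem pvIsB_dom (isB : Char → Bool)
    (hB : ∀ c : Char, isB c = (decide (c.toNat = 10) || decide (c.toNat = 13) || decide (c.toNat = 11) ||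
      decide (c.toNat = 12) || decide (c.toNat = 28) || decide (c.toNat = 29) || decide (c.toNat = 30) ||
      decide (c.toNat = 133) || decide (c.toNat = 8232) || decide (c.toNat = 8233)))
    (c : Char) (hc : pvDomChar c = true) : isB c = (decide (c = '\n') || decide (c = '\x0d')) := by
  rw [hB]
  simp only [pvDomChar, Bool.or_eq_true, Bool.and_eq_true, decide_eq_true_eq, beq_iff_eq] at hc
  have hchar : ∀ (d : Char), (c = d) ↔ (c.toNat = d.toNat) := by
    intro d
    constructor
    · intro h; rw [h]
    · intro h
      exact Char.ext (UInt32.toNat_inj.mp h)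
  have h10 : (c = '\n') ↔ (c.toNat = 10) := hchar '\n'
  have h13 : (c = '\x0d') ↔ (c.toNat = 13) := hchar '\x0d'
  apply Bool.eq_iff_iff.mpr
  simp only [h10, h13, Bool.or_eq_true, decide_eq_true_eq]
  omega

-- on the input domain, keepends splitting and the builtin agree up to stripping each line
set_option maxRecDepth 10000 in
theorem pvBridge (isB : Char → Bool)
    (hB : ∀ c : Char, pvDomChar c = true → isB c = (decide (c = '\n') || decide (c = '\x0d'))) :
    ∀ (cs cur : List Char), cs.all pvDomChar = true →
    (pvSplitKeep cs cur).map PySem.Chars.strip =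
      (PySem.Chars.splitlines.go isB cs cur []).map PySem.Chars.strip := by
  have key : ∀ (cs cur : List Char) (acc0 : List (List Char)), cs.all pvDomChar = true →
      (pvSplitKeep cs cur).map PySem.Chars.strip =
        (PySem.Chars.splitlines.go isB cs cur []).map PySem.Chars.strip := by
    intro cs cur acc0
    induction cs, cur, acc0 using PySem.Chars.splitlines.go.induct (isB := isB) with
    | case1 cur acc hcur => intro _; simp [pvSplitKeep, PySem.Chars.splitlines.go, hcur]
    | case2 cur acc hcur =>
      intro _
      simp [pvSplitKeep, PySem.Chars.splitlines.go, (by revert hcur; cases cur.isEmpty <;> simp : cur.isEmpty = false)]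
    | case3 rest cur acc ih =>
      intro hdom
      have hdom' : rest.all pvDomChar = true := by simp_all
      rw [pvSK_crlf, pvGo_crlf, pvGo_acc]
      simp only [List.reverse_cons, List.reverse_nil, List.nil_append, List.singleton_append,
        List.map_cons, ih hdom']
      congr 1
      exact pvStrip_append_ws cur.reverse ['\x0d', '\n'] (by intro c hc; fin_cases hc <;> decide)
    | case4 c rest cur acc hne hB' ih =>
      intro hdom
      have hcdom : pvDomChar c = true := by simp_all
      have hdom' : rest.all pvDomChar = true := by simp_all
      have hsplit : c = '\n' ∨ c = '\x0d' := by
        have := (hB c hcdom) ▸ hB'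
        simpa using this
      rw [pvGo_break isB c rest cur [] hne hB', pvGo_acc]
      rcases hsplit with h | h
      · subst h
        rw [pvSK_nl]
        simp only [List.reverse_cons, List.reverse_nil, List.nil_append, List.singleton_append,
          List.map_cons, ih hdom']
        congr 1
        exact pvStrip_append_ws cur.reverse ['\n'] (by intro c hc; fin_cases hc <;> decide)
      · subst h
        rw [pvSK_cr rest cur (fun r' hr => hne r' rfl hr)]
        simp only [List.reverse_cons, List.reverse_nil, List.nil_append, List.singleton_append,
          List.map_cons, ih hdom']
        congr 1
        exact pvStrip_append_ws cur.reverse ['\x0d'] (by intro c hc; fin_cases hc <;> decide)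
    | case5 c rest cur acc hne hB' ih =>
      intro hdom
      have hcdom : pvDomChar c = true := by simp_all
      have hdom' : rest.all pvDomChar = true := by simp_all
      have hB'' : isB c = false := by simpa using hB'
      have hcn : ¬ c = '\n' := by
        intro h; subst h
        rw [hB '\n' (by decide)] at hB''; simp at hB''
      have hcr : ¬ c = '\x0d' := by
        intro h; subst h
        rw [hB '\x0d' (by decide)] at hB''; simp at hB''
      rw [pvGo_char isB c rest cur [] hne hB'', pvSK_other c rest cur hcn hcr]
      exact ih hdom'
  intro cs cur h
  exact key cs cur [] h

-- the boolean component of B's fold is exactly the open-block flag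
theorem pvBStep_flag (s e : List Char) : ∀ (ls : List (List Char)) (st : Bool × List (List Char) × Int),
    (ls.foldl (pvBStep s e) st).1 = pvOpenFlag s e st.1 ls := by
  intro ls
  induction ls with
  | nil => intro st; simp [pvOpenFlag]
  | cons l rest ih =>
    intro st
    simp only [List.foldl_cons, pvOpenFlag]
    rw [ih]
    by_cases hb : st.1
    · by_cases h1 : PySem.Chars.strip l = e <;> simp [pvBStep, hb, h1]
    · by_cases h2 : PySem.Chars.strip l = s <;> simp [pvBStep, hb, h2]

-- while inside a block, B's fold skips to just after the closing line A's inner scan finds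
theorem pvFold_inner (s e : List Char) : ∀ (ls rest' : List (List Char)) (o : List (List Char)) (r : Int),
    pvAInner e ls = some rest' →
    ls.foldl (pvBStep s e) (true, o, r) = rest'.foldl (pvBStep s e) (false, o, r) := by
  intro ls
  induction ls with
  | nil => intro rest' o r h; simp [pvAInner] at h
  | cons l rest ih =>
    intro rest' o r h
    simp only [pvAInner] at h
    by_cases h1 : PySem.Chars.strip l = e
    · rw [if_pos h1] at h
      cases h
      simp [pvBStep, h1]
    · rw [if_neg h1] at h
      have step : pvBStep s e (true, o, r) l = (true, o, r) := by simp [pvBStep, h1]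
      rw [List.foldl_cons, step]
      exact ih rest' o r h
  
-- if A's inner scan never finds the end marker, B's fold stays inside
theorem pvFold_inner_none (s e : List Char) : ∀ (ls : List (List Char)) (o : List (List Char)) (r : Int),
    pvAInner e ls = none →
    (ls.foldl (pvBStep s e) (true, o, r)).1 = true := by
  intro ls
  induction ls with
  | nil => intro o r _; simp
  | cons l rest ih =>
    intro o r h
    simp only [pvAInner] at h
    by_cases h1 : PySem.Chars.strip l = e
    · rw [if_pos h1] at h; cases h
    · rw [if_neg h1] at h
      have step : pvBStep s e (true, o, r) l = (true, o, r) := by simp [pvBStep, h1]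
      rw [List.foldl_cons, step]
      exact ih o r h

theorem pvALoop_cons_start (s e l : List Char) (rest rest' : List (List Char))
    (h2 : PySem.Chars.strip l = s) (hi : pvAInner e rest = some rest') :
    pvALoop s e (l :: rest) = ((pvALoop s e rest').1, (pvALoop s e rest').2 + 1) := by
  rw [pvALoop]
  simp only [if_pos h2]
  split <;> simp_all

-- main invariant: whenever B's fold from a non-inside state ends non-inside,
-- it computes exactly A's loop result, appended to the accumulated state
theorem pvMain (s e : List Char) : ∀ (n : Nat) (ls : List (List Char)), ls.length ≤ n →
    ∀ (o : List (List Char)) (r : Int),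
    (ls.foldl (pvBStep s e) (false, o, r)).1 = false →
    ls.foldl (pvBStep s e) (false, o, r) =
      (false, o ++ (pvALoop s e ls).1, r + (pvALoop s e ls).2) := by
  intro n
  induction n with
  | zero =>
    intro ls hlen o r _
    have : ls = [] := List.eq_nil_of_length_eq_zero (Nat.le_zero.mp hlen)
    subst this
    simp [pvALoop]
  | succ n ih =>
    intro ls hlen o r hflag
    match ls with
    | [] => simp [pvALoop]
    | l :: rest =>
      by_cases h2 : PySem.Chars.strip l = s
      · -- start marker: A scans to end marker; B sets the flag
        have step1 : pvBStep s e (false, o, r) l = (true, o, r + 1) := by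
          simp [pvBStep, h2]
        match hinner : pvAInner e rest with
        | none =>
          exfalso
          have := pvFold_inner_none s e rest o (r + 1) hinner
          simp only [List.foldl_cons, step1] at hflag
          rw [hflag] at this
          exact Bool.false_ne_true this
        | some rest' =>
          have hlt : rest'.length < rest.length := pvAInner_length e rest rest' hinner
          have hlen' : rest'.length ≤ n := by
            simp at hlen; omega
          simp only [List.foldl_cons, step1] at hflag ⊢
          rw [pvFold_inner s e rest rest' o (r + 1) hinner] at hflag ⊢
          rw [ih rest' hlen' o (r + 1) hflag]
          rw [pvALoop_cons_start s e l rest rest' h2 hinner]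
          simp only [Prod.mk.injEq]
          refine ⟨trivial, trivial, by ring⟩
      · -- ordinary line: appended by both
        have step1 : pvBStep s e (false, o, r) l = (false, o ++ [l], r) := by
          simp [pvBStep, h2]
        have hlen' : rest.length ≤ n := by simp at hlen; omega
        simp only [List.foldl_cons, step1] at hflag ⊢
        rw [ih rest hlen' (o ++ [l]) r hflag]
        simp [pvALoop, h2]

-- ===== VERDICT (by name: the statement is the Claim_ definition above) =====
theorem remove_delimited_blocks_spec : Claim_equal_remove_delimited_blocks := by
  intro text start_marker end_marker hdom hpre
  unfold Spec_remove_delimited_blocks remove_delimited_blocks remove_delimited_blocks_alt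
  set s := start_marker.toList
  set e := end_marker.toList
  set lines := pvSplitKeep text.toList [] with hlines
  have hdomt : text.toList.all pvDomChar = true := by
    simp only [Dom_remove_delimited_blocks, pvDomStr, Bool.and_eq_true] at hdom
    exact hdom.1.1
  have hbridge : lines.map PySem.Chars.strip =
      (PySem.Chars.splitlines text.toList).map PySem.Chars.strip := by
    rw [hlines]
    unfold PySem.Chars.splitlines
    apply pvBridge _ _ text.toList [] hdomt
    intro c hc
    exact pvIsB_dom _ (fun _ => rfl) c hc
  have hpre' : pvOpenFlag s e false lines = false := by
    rw [pvOpenFlag_congr s e lines (PySem.Chars.splitlines text.toList) false hbridge]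
    exact hpre
  have hflag : (lines.foldl (pvBStep s e) (false, [], 0)).1 = false := by
    rw [pvBStep_flag]
    exact hpre'
  have hmain := pvMain s e lines.length lines le_rfl [] 0 hflag
  simp only [hmain] at hflag ⊢
  simp
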